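-- pv_equiv track=rewrite | github.com/yeong0829/CosPro_Python | 모의고사 1/7번.py | solution
-- ===== SOURCE A (Python) =====
-- def solution(file_info):
--     sucess = 0
--     fail = 0
--     for f in file_info: # f = jpeg,all.jpg,500
--         splited = f.split(",") # splited = ["jpeg", "all.jpg", "500"]
--         if splited[0] == "jpeg" and int(splited[2]) < 1000:
--             sucess += 1
--         else:
--             fail += 1
--     return sucess, fail
-- ===== SOURCE B (Python) =====
-- def solution(file_info):
--     if not file_info:
--         return 0, 0
--     if len(file_info) == 1:
--         sp = file_info[0].split(",")
--         if sp[0] == "jpeg" and int(sp[2]) < 1000: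
--             return 1, 0
--         return 0, 1
--     mid = len(file_info) // 2
--     s1, f1 = solution(file_info[:mid])
--     s2, f2 = solution(file_info[mid:])
--     return s1 + s2, f1 + f2
-- ===== Notes on version B (the rewrite author's own statement) =====
-- stated objective: alternative
-- what changed: Replaces A's single-pass two-counter loop by a divide-and-conquer recursion that splits the list in halves, classifies singletons at the leaves and adds the (success, fail) pairs of the halves.
import Mathlib
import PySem

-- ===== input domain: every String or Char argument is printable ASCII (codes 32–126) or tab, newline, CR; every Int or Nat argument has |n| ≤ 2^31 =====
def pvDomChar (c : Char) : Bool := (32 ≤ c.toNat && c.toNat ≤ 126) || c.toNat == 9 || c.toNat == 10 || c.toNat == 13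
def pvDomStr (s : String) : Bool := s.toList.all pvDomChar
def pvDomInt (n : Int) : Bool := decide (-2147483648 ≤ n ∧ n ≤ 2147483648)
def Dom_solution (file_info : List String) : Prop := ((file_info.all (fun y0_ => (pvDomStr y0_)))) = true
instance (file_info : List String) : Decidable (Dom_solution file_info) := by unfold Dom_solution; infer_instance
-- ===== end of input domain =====

-- B replaces A's single-pass two-counter loop by a divide-and-conquer recursion on halves (objective: alternative).


-- ===== PORT A =====
-- loop with two counters; the size test is the Option form of int(splited[2]) < 1000
-- (none = ValueError/IndexError, excluded by Pre_)
def solution (file_info : List String) : Int × Int :=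
  file_info.foldl
    (fun (st : Int × Int) f =>
      let splited := (PySem.Str.split? f ",").getD []
      if PySem.List.pyGet? splited 0 = some "jpeg" ∧
         ((PySem.List.pyGet? splited 2).bind PySem.Int.ofStr?).getD 1000 < 1000 then
        (st.1 + 1, st.2)
      else
        (st.1, st.2 + 1))
    (0, 0)

-- ===== PORT B =====
-- divide and conquer: empty / singleton base cases, otherwise split at mid = len//2,
-- recurse on file_info[:mid] and file_info[mid:] and add the pairs
def solution_alt (file_info : List String) : Int × Int :=
  if file_info.length = 0 then (0, 0)
  else if file_info.length = 1 then
    let sp := (PySem.Str.split? ((PySem.List.pyGet? file_info 0).getD "") ",").getD []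
    if PySem.List.pyGet? sp 0 = some "jpeg" ∧
       ((PySem.List.pyGet? sp 2).bind PySem.Int.ofStr?).getD 1000 < 1000 then (1, 0)
    else (0, 1)
  else
    let mid := file_info.length / 2
    let r1 := solution_alt (PySem.List.slice file_info none (some (mid : Int)))
    let r2 := solution_alt (PySem.List.slice file_info (some (mid : Int)) none)
    (r1.1 + r2.1, r1.2 + r2.2)
termination_by file_info.length
decreasing_by
  · simp only [PySem.List.slice_to_natCast, List.length_take]; omega
  · simp only [PySem.List.slice_from_natCast, List.length_drop]; omega

-- ===== PRECONDITION & SPEC =====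
-- Pre_ excludes exactly the inputs where Python A raises: an entry whose first
-- comma-field is "jpeg" but whose third field is missing (IndexError) or not an
-- int literal (ValueError).
def Pre_solution (file_info : List String) : Prop :=
  ∀ f ∈ file_info,
    PySem.List.pyGet? ((PySem.Str.split? f ",").getD []) 0 = some "jpeg" →
    ((PySem.List.pyGet? ((PySem.Str.split? f ",").getD []) 2).bind PySem.Int.ofStr?).isSome = true
instance (file_info : List String) : Decidable (Pre_solution file_info) := by
  unfold Pre_solution; infer_instance
def pvWitness_solution : List String := ["jpeg,a.jpg,500", "png,b.png,5", "jpeg,c.jpg,2000"]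
def Spec_solution (file_info : List String) (out : Int × Int) : Prop := out = solution_alt file_info
instance (file_info : List String) (out : Int × Int) : Decidable (Spec_solution file_info out) := by unfold Spec_solution; infer_instance

-- ===== CLAIM (what is proved, stated in full; the proofs are below) =====
def Claim_equal_solution : Prop := ∀ (file_info : List String), Dom_solution file_info → Pre_solution file_info → Spec_solution file_info (solution file_info)

-- ===== LEMMAS AND PROOFS =====
-- the common predicate both proofs are phrased through
def solJpegSmall (f : String) : Bool :=
  let sp := (PySem.Str.split? f ",").getD []
  decide (PySem.List.pyGet? sp 0 = some "jpeg") &&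
  decide (((PySem.List.pyGet? sp 2).bind PySem.Int.ofStr?).getD 1000 < 1000)

-- loop invariant: A's fold from any accumulator adds the success count and the complement
lemma solution_foldl (l : List String) (a b : Int) :
    l.foldl
      (fun (st : Int × Int) f =>
        let splited := (PySem.Str.split? f ",").getD []
        if PySem.List.pyGet? splited 0 = some "jpeg" ∧
           ((PySem.List.pyGet? splited 2).bind PySem.Int.ofStr?).getD 1000 < 1000 then
          (st.1 + 1, st.2)
        else
          (st.1, st.2 + 1))
      (a, b)
    = (a + (l.countP solJpegSmall : Int), b + ((l.length : Int) - (l.countP solJpegSmall : Int))) := by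
  induction l generalizing a b with
  | nil => simp
  | cons x xs ih =>
    by_cases hx : solJpegSmall x
    · have hc : PySem.List.pyGet? ((PySem.Str.split? x ",").getD []) 0 = some "jpeg" ∧
          ((PySem.List.pyGet? ((PySem.Str.split? x ",").getD []) 2).bind PySem.Int.ofStr?).getD 1000 < 1000 := by
        simpa [solJpegSmall] using hx
      simp only [List.foldl_cons, if_pos hc, ih, List.countP_cons, hx, List.length_cons]
      push_cast
      simp only [Prod.mk.injEq]
      constructor <;> ring
    · have hc : ¬(PySem.List.pyGet? ((PySem.Str.split? x ",").getD []) 0 = some "jpeg" ∧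
          ((PySem.List.pyGet? ((PySem.Str.split? x ",").getD []) 2).bind PySem.Int.ofStr?).getD 1000 < 1000) := by
        simpa [solJpegSmall] using hx
      simp only [List.foldl_cons, if_neg hc, ih, List.countP_cons, hx, List.length_cons]
      push_cast
      simp only [Prod.mk.injEq]
      constructor <;> ring

-- B's divide-and-conquer computes the same count-and-complement pair
-- (strong induction on the length, via an explicit bound n)
lemma solution_alt_eq_aux : ∀ (n : Nat) (l : List String), l.length ≤ n →
    solution_alt l = ((l.countP solJpegSmall : Int), (l.length : Int) - (l.countP solJpegSmall : Int)) := by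
  intro n
  induction n with
  | zero =>
    intro l hl
    have : l = [] := List.length_eq_zero_iff.mp (Nat.le_zero.mp hl)
    subst this
    simp [solution_alt]
  | succ n ih =>
    intro l hl
    rw [solution_alt]
    by_cases h0 : l.length = 0
    · have : l = [] := List.length_eq_zero_iff.mp h0
      subst this; simp
    · by_cases h1 : l.length = 1
      · obtain ⟨x, hx⟩ := List.length_eq_one_iff.mp h1
        subst hx
        have hget : (PySem.List.pyGet? [x] 0).getD "" = x := by
          simp [PySem.List.pyGet?, PySem.List.pyIdx?]
        rw [if_neg h0, if_pos h1]
        simp only [hget]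
        by_cases hc : PySem.List.pyGet? ((PySem.Str.split? x ",").getD []) 0 = some "jpeg" ∧
            ((PySem.List.pyGet? ((PySem.Str.split? x ",").getD []) 2).bind PySem.Int.ofStr?).getD 1000 < 1000
        · have hx' : solJpegSmall x = true := by simpa [solJpegSmall] using hc
          simp [hc, hx']
        · have hx' : solJpegSmall x = false := by
            cases hb : solJpegSmall x with
            | false => rfl
            | true => exact absurd (by simpa [solJpegSmall] using hb) hc
          simp [hc, hx']
      · simp only [if_neg h0, if_neg h1]
        have hlen2 : 2 ≤ l.length := by omega
        set m := l.length / 2 with hm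
        have hm1 : 1 ≤ m := by omega
        have hmlt : m < l.length := by omega
        rw [PySem.List.slice_to_natCast, PySem.List.slice_from_natCast]
        rw [ih (l.take m) (by simp; omega), ih (l.drop m) (by simp; omega)]
        have hsplit : l.countP solJpegSmall
            = (l.take m).countP solJpegSmall + (l.drop m).countP solJpegSmall := by
          conv_lhs => rw [← List.take_append_drop m l]
          rw [List.countP_append]
        have hlt : (l.take m).length = m := by simp; omega
        have hld : (l.drop m).length = l.length - m := by simp
        simp only [Prod.mk.injEq]
        constructor
        · rw [hsplit]; push_cast; ring
        · rw [hsplit, hlt, hld]; push_cast [Nat.sub_add_cancel]; omega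

-- ===== VERDICT (by name: the statement is the Claim_ definition above) =====
theorem solution_spec : Claim_equal_solution := by
  intro file_info _ _
  unfold Spec_solution solution
  rw [solution_foldl, solution_alt_eq_aux file_info.length file_info le_rfl]
  simp
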